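-- pv_equiv track=rewrite | github.com/gbowdler/bromyard-hub | scripts/confirm_load.py | mark_transported
-- ===== SOURCE A (Python) =====
-- def mark_transported(rows, bale_numbers, load_number, date_str):
--     """
--     Set Transported = TRUE for the specified bales.
--
--     Returns (updated_rows, not_found) — not_found lists any bale numbers
--     that weren't in the log so Claude can flag them.
--     """
--     target = set(str(b).strip() for b in bale_numbers)
--     found  = set()
--
--     for row in rows:
--         bale_no = str(row["Bale No."]).strip()
--         if bale_no in target:
--             row["Transported"] = "TRUE"
--             row["Load Number"]  = str(load_number)
--             row["Load Date"]    = date_str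
--             found.add(bale_no)
--
--     not_found = sorted(target - found)
--     return rows, not_found
-- ===== SOURCE B (Python) =====
-- def mark_transported(rows, bale_numbers, load_number, date_str):
--     """
--     Set Transported = TRUE for the specified bales.
--
--     Inverted decomposition: build an index bale-no -> list of row positions in
--     one pass, then drive the update loop over the sorted target bales,
--     collecting not_found on the fly.
--     """
--     index = {}
--     for i, row in enumerate(rows):
--         index.setdefault(str(row["Bale No."]).strip(), []).append(i)
--
--     not_found = []
--     for bale in sorted(set(str(b).strip() for b in bale_numbers)):
--         if bale in index:
--             for i in index[bale]:
--                 row = rows[i]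
--                 row["Transported"] = "TRUE"
--                 row["Load Number"] = str(load_number)
--                 row["Load Date"] = date_str
--         else:
--             not_found.append(bale)
--     return rows, not_found
-- ===== Notes on version B (the rewrite author's own statement) =====
-- stated objective: alternative
-- what changed: B inverts the driving loop: it builds an index dict mapping each cleaned bale number to the list of row positions in one pass, then iterates over the sorted target bales, updating every row in the matching bucket and collecting not_found on the fly, instead of A's single scan over rows with a found-set and a final set difference.
import Mathlib
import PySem

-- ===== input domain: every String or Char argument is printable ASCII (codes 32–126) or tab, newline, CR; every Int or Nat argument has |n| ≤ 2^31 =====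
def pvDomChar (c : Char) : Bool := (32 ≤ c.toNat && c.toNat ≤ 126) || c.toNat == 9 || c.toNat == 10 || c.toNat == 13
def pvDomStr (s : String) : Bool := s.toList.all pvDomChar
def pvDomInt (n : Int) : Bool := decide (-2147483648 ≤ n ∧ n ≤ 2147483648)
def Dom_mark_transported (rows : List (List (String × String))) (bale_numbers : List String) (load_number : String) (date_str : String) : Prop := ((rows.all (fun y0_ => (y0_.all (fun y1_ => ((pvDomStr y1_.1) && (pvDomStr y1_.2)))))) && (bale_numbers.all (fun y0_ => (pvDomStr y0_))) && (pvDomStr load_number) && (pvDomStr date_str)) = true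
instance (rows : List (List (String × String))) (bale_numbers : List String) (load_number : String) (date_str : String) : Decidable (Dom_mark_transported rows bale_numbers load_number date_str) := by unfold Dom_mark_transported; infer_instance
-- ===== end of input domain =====

-- B inverts A's decomposition: an index bale-number → row positions is built in one pass, the update
-- loop then drives over the sorted target bales (objective: alternative decomposition, same cost).
-- Both Pythons mutate the row dicts in place; the equivalence proved here is about the returned
-- (rows, not_found) value, which contains those updated rows.

-- ===== PORT A =====
def mark_transported (rows : List (List (String × String))) (bale_numbers : List String) (load_number : String) (date_str : String) : (List (List (String × String))) × List String :=
  -- target = set(str(b).strip() for b in bale_numbers)   (str(b) = b: bale_numbers are strings)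
  let target : PySem.Set String := PySem.Set.ofList (bale_numbers.map (fun b => PySem.Str.strip b))
  -- for row in rows: …  with accumulators (rows written so far, found)
  let st := rows.foldl
    (fun (acc : List (List (String × String)) × PySem.Set String) row =>
      -- row["Bale No."] raises KeyError when the key is absent — excluded by Pre_; getD "" is exact under Pre_
      let bale_no := PySem.Str.strip ((PySem.Dict.mk row).getD "Bale No." "")
      if PySem.Set.contains target bale_no then
        (acc.1 ++ [((((PySem.Dict.mk row).insert "Transported" "TRUE").insert "Load Number" load_number).insert "Load Date" date_str).items],
         PySem.Set.add acc.2 bale_no)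
      else
        (acc.1 ++ [row], acc.2))
    ([], PySem.Set.empty)
  -- sorted(target - found): sorted without key, hence independent of set iteration order
  (st.1, PySem.List.sorted (PySem.Set.diff target st.2) (fun x => x) false)

-- ===== PORT B =====
def mark_transported_alt (rows : List (List (String × String))) (bale_numbers : List String) (load_number : String) (date_str : String) : (List (List (String × String))) × List String :=
  -- index.setdefault(str(row["Bale No."]).strip(), []).append(i)  ==  d[k] = d.get(k, []) + [i]  ==  Dict.modify
  let index : PySem.Dict String (List Int) :=
    (PySem.List.enumerate rows 0).foldl
      (fun d p =>
        d.modify (PySem.Str.strip ((PySem.Dict.mk p.2).getD "Bale No." "")) [] (fun is => is ++ [p.1]))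
      PySem.Dict.empty
  -- for bale in sorted(set(str(b).strip() for b in bale_numbers)): …  with accumulators (rows, not_found)
  let st := (PySem.List.sorted (PySem.Set.ofList (bale_numbers.map (fun b => PySem.Str.strip b))) (fun x => x) false).foldl
    (fun (acc : List (List (String × String)) × List String) bale =>
      if index.contains bale then
        ((index.getD bale []).foldl
          (fun rs i =>
            -- row = rows[i]; row[…] = … : i comes from enumerate, hence 0 ≤ i < len(rows); pyGetD/pySetD are exact there
            PySem.List.pySetD rs i ((((PySem.Dict.mk (PySem.List.pyGetD rs i [])).insert "Transported" "TRUE").insert "Load Number" load_number).insert "Load Date" date_str).items)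
          acc.1,
         acc.2)
      else
        (acc.1, acc.2 ++ [bale]))
    (rows, [])
  st

-- ===== PRECONDITION & SPEC =====
-- Pre_ excludes exactly the inputs with a row without a "Bale No." key, on which Python A raises KeyError.
def Pre_mark_transported (rows : List (List (String × String))) (bale_numbers : List String) (load_number : String) (date_str : String) : Prop :=
  (rows.all (fun row => (PySem.Dict.mk row).contains "Bale No.")) = true
instance (rows : List (List (String × String))) (bale_numbers : List String) (load_number : String) (date_str : String) : Decidable (Pre_mark_transported rows bale_numbers load_number date_str) := by unfold Pre_mark_transported; infer_instance

def pvWitness_mark_transported : (List (List (String × String))) × List String × String × String :=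
  ([[("Bale No.", "1"), ("Transported", "FALSE")], [("Bale No.", "2")]], ["1", "3"], "L7", "2024-01-01")

def Spec_mark_transported (rows : List (List (String × String))) (bale_numbers : List String) (load_number : String) (date_str : String) (out : (List (List (String × String))) × List String) : Prop := out = mark_transported_alt rows bale_numbers load_number date_str
instance (rows : List (List (String × String))) (bale_numbers : List String) (load_number : String) (date_str : String) (out : (List (List (String × String))) × List String) : Decidable (Spec_mark_transported rows bale_numbers load_number date_str out) := by unfold Spec_mark_transported; infer_instance

-- ===== CLAIM (what is proved, stated in full; the proofs are below) =====
def Claim_equal_mark_transported : Prop := ∀ (rows : List (List (String × String))) (bale_numbers : List String) (load_number : String) (date_str : String), Dom_mark_transported rows bale_numbers load_number date_str → Pre_mark_transported rows bale_numbers load_number date_str → Spec_mark_transported rows bale_numbers load_number date_str (mark_transported rows bale_numbers load_number date_str)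

-- ===== LEMMAS AND PROOFS =====

-- the row update both programs perform
def pvUpdRow (ln ds : String) (row : List (String × String)) : List (String × String) :=
  ((((PySem.Dict.mk row).insert "Transported" "TRUE").insert "Load Number" ln).insert "Load Date" ds).items

-- the cleaned bale number of a row
def pvBaleKey (row : List (String × String)) : String :=
  PySem.Str.strip ((PySem.Dict.mk row).getD "Bale No." "")

-- the target set of cleaned bale numbers
def pvTarget (bales : List String) : PySem.Set String :=
  PySem.Set.ofList (bales.map (fun b => PySem.Str.strip b))

-- B's index
def pvIndex (rows : List (List (String × String))) : PySem.Dict String (List Int) :=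
  (PySem.List.enumerate rows 0).foldl
    (fun d p => d.modify (pvBaleKey p.2) [] (fun is => is ++ [p.1])) PySem.Dict.empty

-- the positions of the rows carrying bale number b, in order
def pvBucket (rows : List (List (String × String))) (b : String) : List Int :=
  ((PySem.List.enumerate rows 0).filter (fun p => pvBaleKey p.2 == b)).map (fun p => p.1)

-- all positions B updates, in B's update order
def pvS (rows : List (List (String × String))) (bales : List String) : List Int :=
  (PySem.List.sorted (pvTarget bales) (fun x => x) false).flatMap (pvBucket rows)

-- A's found set
def pvFound (rows : List (List (String × String))) (bales : List String) : PySem.Set String :=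
  PySem.Set.ofList ((rows.filter (fun r => PySem.Set.contains (pvTarget bales) (pvBaleKey r))).map pvBaleKey)

-- A's loop: the rows component is a pointwise map, the found set collects the matched keys
lemma foldA_shape (ln ds : String) (T : PySem.Set String) :
    ∀ (rows : List (List (String × String))) (acc : List (List (String × String)) × PySem.Set String),
      rows.foldl
        (fun acc row =>
          if PySem.Set.contains T (PySem.Str.strip ((PySem.Dict.mk row).getD "Bale No." "")) then
            (acc.1 ++ [((((PySem.Dict.mk row).insert "Transported" "TRUE").insert "Load Number" ln).insert "Load Date" ds).items],
             PySem.Set.add acc.2 (PySem.Str.strip ((PySem.Dict.mk row).getD "Bale No." "")))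
          else (acc.1 ++ [row], acc.2)) acc
      = (acc.1 ++ rows.map (fun r => if PySem.Set.contains T (pvBaleKey r) then pvUpdRow ln ds r else r),
         PySem.Set.update acc.2 ((rows.filter (fun r => PySem.Set.contains T (pvBaleKey r))).map pvBaleKey)) := by
  intro rows
  induction rows with
  | nil => intro acc; simp [PySem.Set.update]
  | cons r rows ih =>
    intro acc
    simp only [List.foldl_cons]
    by_cases h : PySem.Set.contains T (pvBaleKey r) = true
    · have hm : PySem.Str.strip ((PySem.Dict.mk r).getD "Bale No." "") ∈ T := by
        simpa [pvBaleKey] using (PySem.Set.contains_iff T _).mp h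
      rw [if_pos (by simpa [pvBaleKey] using h)]
      rw [ih]
      simp [pvBaleKey, pvUpdRow, hm, PySem.Set.update]
    · have hm : PySem.Str.strip ((PySem.Dict.mk r).getD "Bale No." "") ∉ T := by
        intro hmem
        exact h ((PySem.Set.contains_iff T _).mpr (by simpa [pvBaleKey] using hmem))
      rw [if_neg (by simpa [pvBaleKey] using h)]
      rw [ih]
      simp [pvBaleKey, pvUpdRow, hm, PySem.Set.update]

lemma A_shape (rows : List (List (String × String))) (bales : List String) (ln ds : String) :
    mark_transported rows bales ln ds
      = (rows.map (fun r => if PySem.Set.contains (pvTarget bales) (pvBaleKey r) then pvUpdRow ln ds r else r),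
         PySem.List.sorted (PySem.Set.diff (pvTarget bales) (pvFound rows bales)) (fun x => x) false) := by
  unfold mark_transported
  dsimp only
  rw [show PySem.Set.ofList (List.map (fun b => PySem.Str.strip b) bales) = pvTarget bales from rfl,
      foldA_shape ln ds (pvTarget bales) rows ([], PySem.Set.empty)]
  simp [pvFound, PySem.Set.update_nil_left]

-- B's index holds exactly the fibers of the cleaned-bale-number map
lemma index_getD (rows : List (List (String × String))) (b : String) :
    (pvIndex rows).getD b [] = pvBucket rows b := by
  unfold pvIndex pvBucket
  have h := PySem.Dict.getD_foldl_modify_append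
    ((PySem.List.enumerate rows 0).map (fun p => (pvBaleKey p.2, p.1))) PySem.Dict.empty b
  rw [List.foldl_map] at h
  simp only [h, List.filter_map, List.map_map, PySem.Dict.getD_empty]
  simp [Function.comp_def]

lemma index_contains (rows : List (List (String × String))) (b : String) :
    (pvIndex rows).contains b = true ↔ ∃ k : Nat, ∃ _ : k < rows.length, pvBaleKey rows[k] = b := by
  unfold pvIndex
  rw [PySem.Dict.contains_iff_mem_keys]
  rw [PySem.Dict.keys_foldl_modify_key (PySem.List.enumerate rows 0) (fun p => pvBaleKey p.2) []
      (fun _ p => fun is => is ++ [p.1]) PySem.Dict.empty]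
  simp only [PySem.Dict.keys_empty, PySem.Set.update_nil_left, PySem.Set.mem_ofList, List.mem_map]
  constructor
  · rintro ⟨p, hp, rfl⟩
    rcases (PySem.List.mem_enumerate_iff rows 0 p).mp hp with ⟨k, hk, rfl⟩
    exact ⟨k, hk, rfl⟩
  · rintro ⟨k, hk, rfl⟩
    exact ⟨((k : Int), rows[k]), (PySem.List.mem_enumerate_iff rows 0 _).mpr ⟨k, hk, by simp⟩, rfl⟩

lemma bucket_nil_of_not_contains (rows : List (List (String × String))) (b : String)
    (h : (pvIndex rows).contains b = false) : pvBucket rows b = [] := by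
  rw [← index_getD]
  exact PySem.Dict.getD_of_not_contains _ _ h

-- B's loop: the row updates flatten to one pass over pvS, not_found is a filter of the driving list
lemma foldB_shape (rows0 : List (List (String × String))) (ln ds : String) :
    ∀ (L : List String) (acc : List (List (String × String)) × List String),
      L.foldl
        (fun acc bale =>
          if (pvIndex rows0).contains bale then
            (((pvIndex rows0).getD bale []).foldl
              (fun rs i =>
                PySem.List.pySetD rs i ((((PySem.Dict.mk (PySem.List.pyGetD rs i [])).insert "Transported" "TRUE").insert "Load Number" ln).insert "Load Date" ds).items)
              acc.1,
             acc.2)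
          else (acc.1, acc.2 ++ [bale])) acc
      = ((L.flatMap (pvBucket rows0)).foldl
           (fun rs i => PySem.List.pySetD rs i (pvUpdRow ln ds (PySem.List.pyGetD rs i []))) acc.1,
         acc.2 ++ L.filter (fun b => !(pvIndex rows0).contains b)) := by
  intro L
  induction L with
  | nil => intro acc; simp
  | cons b L ih =>
    intro acc
    simp only [List.foldl_cons, List.flatMap_cons, List.filter_cons, List.foldl_append]
    by_cases h : (pvIndex rows0).contains b = true
    · rw [if_pos h, ih]
      simp [h, index_getD, pvUpdRow]
    · have hf : (pvIndex rows0).contains b = false := by simpa using h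
      rw [if_neg h, ih]
      simp [hf, bucket_nil_of_not_contains rows0 b hf]

lemma B_shape (rows : List (List (String × String))) (bales : List String) (ln ds : String) :
    mark_transported_alt rows bales ln ds
      = ((pvS rows bales).foldl
           (fun rs i => PySem.List.pySetD rs i (pvUpdRow ln ds (PySem.List.pyGetD rs i []))) rows,
         (PySem.List.sorted (pvTarget bales) (fun x => x) false).filter (fun b => !(pvIndex rows).contains b)) := by
  unfold mark_transported_alt
  dsimp only
  rw [show ((PySem.List.enumerate rows 0).foldl
      (fun d p =>
        d.modify (PySem.Str.strip ((PySem.Dict.mk p.2).getD "Bale No." "")) [] (fun is => is ++ [p.1]))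
      PySem.Dict.empty) = pvIndex rows from rfl]
  rw [foldB_shape rows ln ds _ (rows, [])]
  simp [pvS, pvTarget]

-- writing f(rows[i]) back at a Nodup list of in-range positions is a pointwise mapIdx
lemma setfold {ρ : Type} (f : ρ → ρ) (d0 : ρ) :
    ∀ (S : List Int) (rs : List ρ), S.Nodup → (∀ i ∈ S, 0 ≤ i ∧ i < (rs.length : Int)) →
      S.foldl (fun rs i => PySem.List.pySetD rs i (f (PySem.List.pyGetD rs i d0))) rs
        = rs.mapIdx (fun k r => if (k : Int) ∈ S then f r else r) := by
  intro S
  induction S with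
  | nil =>
    intro rs _ _
    apply List.ext_getElem <;> simp
  | cons i S ih =>
    intro rs hnd hrange
    obtain ⟨hi0, hilt⟩ := hrange i (List.mem_cons_self)
    have hitn : i.toNat < rs.length := by omega
    simp only [List.foldl_cons]
    rw [PySem.List.pyGetD_of_nonneg rs d0 hi0, PySem.List.pySetD_of_nonneg rs _ hi0,
        List.getD_eq_getElem rs d0 hitn]
    rw [ih _ (List.Nodup.of_cons hnd) (by
      intro j hj
      have := hrange j (List.mem_cons_of_mem _ hj)
      simpa using this)]
    apply List.ext_getElem
    · simp
    · intro k hk1 hk2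
      simp only [List.getElem_mapIdx, List.getElem_set]
      by_cases hki : i.toNat = k
      · subst hki
        have hknotS : i ∉ S := (List.nodup_cons.mp hnd).1
        have hcast : (i.toNat : Int) = i := Int.toNat_of_nonneg hi0
        simp [hcast, hknotS, List.mem_cons]
      · have hne : ((k : Int) = i) = False := by
          simp only [eq_iff_iff, iff_false]
          intro hEq
          exact hki (by omega)
        simp [hki, List.mem_cons, hne]

lemma mem_bucket (rows : List (List (String × String))) (b : String) (i : Int) :
    i ∈ pvBucket rows b ↔ ∃ k : Nat, ∃ _ : k < rows.length, i = k ∧ pvBaleKey rows[k] = b := by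
  unfold pvBucket
  simp only [List.mem_map, List.mem_filter]
  constructor
  · rintro ⟨p, ⟨hp, hb⟩, rfl⟩
    rcases (PySem.List.mem_enumerate_iff rows 0 p).mp hp with ⟨k, hk, rfl⟩
    exact ⟨k, hk, by simp, by simpa using hb⟩
  · rintro ⟨k, hk, rfl, hb⟩
    exact ⟨((k : Int), rows[k]), ⟨(PySem.List.mem_enumerate_iff rows 0 _).mpr ⟨k, hk, by simp⟩, by simpa using hb⟩, rfl⟩

lemma mem_S (rows : List (List (String × String))) (bales : List String) (i : Int) :
    i ∈ pvS rows bales ↔ ∃ k : Nat, ∃ _ : k < rows.length, i = k ∧ pvBaleKey rows[k] ∈ pvTarget bales := by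
  unfold pvS
  simp only [List.mem_flatMap, PySem.List.mem_sorted]
  constructor
  · rintro ⟨b, hbT, hib⟩
    rcases (mem_bucket rows b i).mp hib with ⟨k, hk, rfl, hb⟩
    exact ⟨k, hk, rfl, hb ▸ hbT⟩
  · rintro ⟨k, hk, rfl, hT⟩
    exact ⟨pvBaleKey rows[k], hT, (mem_bucket rows _ _).mpr ⟨k, hk, rfl, rfl⟩⟩

lemma nodup_bucket (rows : List (List (String × String))) (b : String) : (pvBucket rows b).Nodup := by
  unfold pvBucket
  have h1 : (PySem.List.enumerate rows 0).Pairwise (fun p q => p.1 < q.1) :=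
    PySem.List.pairwise_lt_enumerate rows 0
  have h2 := h1.filter (fun p => pvBaleKey p.2 == b)
  have h3 : (((PySem.List.enumerate rows 0).filter (fun p => pvBaleKey p.2 == b)).map (fun p => p.1)).Pairwise (· < ·) := by
    rw [List.pairwise_map]; exact h2
  exact h3.imp (fun h => ne_of_lt h)

lemma nodup_S (rows : List (List (String × String))) (bales : List String) : (pvS rows bales).Nodup := by
  unfold pvS
  rw [List.nodup_flatMap]
  refine ⟨fun b _ => nodup_bucket rows b, ?_⟩
  have hnd : (PySem.List.sorted (pvTarget bales) (fun x => x) false).Nodup :=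
    ((PySem.List.sorted_perm (pvTarget bales) (fun x => x) false).nodup_iff).mpr
      (PySem.Set.nodup_ofList _)
  refine hnd.imp ?_
  intro b b' hne i hib hib'
  rcases (mem_bucket rows b i).mp hib with ⟨k, hk, rfl, hb⟩
  rcases (mem_bucket rows b' _).mp hib' with ⟨k', hk', hkk, hb'⟩
  have : k = k' := by omega
  exact hne (hb ▸ this ▸ hb')

-- B updates exactly the rows whose cleaned bale number is in the target set — A's map
lemma rows_eq (rows : List (List (String × String))) (bales : List String) (ln ds : String) :
    (pvS rows bales).foldl
        (fun rs i => PySem.List.pySetD rs i (pvUpdRow ln ds (PySem.List.pyGetD rs i []))) rows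
      = rows.map (fun r => if PySem.Set.contains (pvTarget bales) (pvBaleKey r) then pvUpdRow ln ds r else r) := by
  rw [setfold (pvUpdRow ln ds) [] (pvS rows bales) rows (nodup_S rows bales) (by
    intro i hi
    rcases (mem_S rows bales i).mp hi with ⟨k, hk, rfl, _⟩
    constructor <;> omega)]
  apply List.ext_getElem
  · simp
  · intro k hk1 hk2
    simp only [List.getElem_mapIdx, List.getElem_map]
    have hlen : k < rows.length := by simpa using hk2
    have hmem : ((k : Int) ∈ pvS rows bales) ↔ pvBaleKey rows[k] ∈ pvTarget bales := by
      rw [mem_S]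
      constructor
      · rintro ⟨k', hk', hkk, hT⟩
        have : k = k' := by omega
        exact this ▸ hT
      · intro hT; exact ⟨k, hlen, rfl, hT⟩
    by_cases hT : pvBaleKey rows[k] ∈ pvTarget bales
    · rw [if_pos (hmem.mpr hT), if_pos (by rw [PySem.Set.contains_iff]; exact hT)]
    · rw [if_neg (fun hmemS => hT (hmem.mp hmemS)),
          if_neg (by rw [PySem.Set.contains_iff]; exact hT)]

-- B's not_found (a filter of the sorted target list) is A's sorted(target - found)
lemma notfound_eq (rows : List (List (String × String))) (bales : List String) :
    (PySem.List.sorted (pvTarget bales) (fun x => x) false).filter (fun b => !(pvIndex rows).contains b)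
      = PySem.List.sorted (PySem.Set.diff (pvTarget bales) (pvFound rows bales)) (fun x => x) false := by
  have hpair0 : (PySem.List.sorted (pvTarget bales) (fun x => x) false).Pairwise (· < ·) := by
    simpa [pvTarget] using PySem.List.sorted_ofList_pairwise_lt (bales.map (fun b => PySem.Str.strip b))
  have hpair := hpair0.filter (fun b => !(pvIndex rows).contains b)
  refine (PySem.List.sorted_eq_of_perm_of_pairwise_lt _ _ _ ?_ hpair).symm
  have hndL : ((PySem.List.sorted (pvTarget bales) (fun x => x) false).filter
      (fun b => !(pvIndex rows).contains b)).Nodup :=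
    (((PySem.List.sorted_perm (pvTarget bales) (fun x => x) false).nodup_iff).mpr
      (PySem.Set.nodup_ofList _)).filter _
  have hndR : (PySem.Set.diff (pvTarget bales) (pvFound rows bales)).Nodup :=
    PySem.Set.nodup_diff _ _ (PySem.Set.nodup_ofList _)
  rw [List.perm_ext_iff_of_nodup hndL hndR]
  intro b
  rw [List.mem_filter, PySem.List.mem_sorted, PySem.Set.mem_diff]
  constructor
  · rintro ⟨hbT, hnc⟩
    refine ⟨hbT, ?_⟩
    intro hbF
    unfold pvFound at hbF
    rw [PySem.Set.mem_ofList] at hbF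
    rcases List.mem_map.mp hbF with ⟨r, hr, rfl⟩
    rcases List.mem_filter.mp hr with ⟨hrmem, _⟩
    rcases List.mem_iff_getElem.mp hrmem with ⟨k, hk, rfl⟩
    have : (pvIndex rows).contains (pvBaleKey rows[k]) = true :=
      (index_contains rows _).mpr ⟨k, hk, rfl⟩
    simp [this] at hnc
  · rintro ⟨hbT, hnF⟩
    refine ⟨hbT, ?_⟩
    by_cases hc : (pvIndex rows).contains b = true
    · rcases (index_contains rows b).mp hc with ⟨k, hk, hkb⟩
      exfalso
      apply hnF
      unfold pvFound
      rw [PySem.Set.mem_ofList]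
      refine List.mem_map.mpr ⟨rows[k], List.mem_filter.mpr ⟨List.getElem_mem hk, ?_⟩, hkb⟩
      exact (PySem.Set.contains_iff _ _).mpr (by rw [hkb]; exact hbT)
    · simp [Bool.not_eq_true] at hc ⊢
      simp [hc]

-- ===== VERDICT (by name: the statement is the Claim_ definition above) =====
theorem mark_transported_spec : Claim_equal_mark_transported := by
  intro rows bales ln ds _ _
  unfold Spec_mark_transported
  rw [A_shape, B_shape, rows_eq, notfound_eq]
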